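-- pv_equiv track=rewrite | github.com/StarBlack69/Eye-tracking- | 19. Graficar_predicciones_modelos.py | obtener_intervalos
-- ===== SOURCE A (Python) =====
-- def obtener_intervalos(etiquetas, valor):
--     """
--     Encuentra los intervalos continuos de una etiqueta específica
--     para poder dibujar los bloques de color continuos en la gráfica.
--     """
--     intervalos = []
--     inicio = None
--     for i, v in enumerate(etiquetas):
--         if v == valor and inicio is None:
--             inicio = i
--         elif v != valor and inicio is not None:
--             intervalos.append((inicio, i - inicio))
--             inicio = None
--     if inicio is not None:
--         intervalos.append((inicio, len(etiquetas) - inicio))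
--     return intervalos
-- ===== SOURCE B (Python) =====
-- from itertools import groupby
--
-- def obtener_intervalos(etiquetas, valor):
--     intervalos = []
--     i = 0
--     for clave, grupo in groupby(etiquetas):
--         n = sum(1 for _ in grupo)
--         if clave == valor:
--             intervalos.append((i, n))
--         i += n
--     return intervalos
-- ===== Notes on version B (the rewrite author's own statement) =====
-- stated objective: idiomatic
-- what changed: Replaced A's inicio-sentinel state machine over enumerate with an itertools.groupby pass that collapses consecutive equal labels into runs and emits (start, length) for runs equal to valor.
import Mathlib
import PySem

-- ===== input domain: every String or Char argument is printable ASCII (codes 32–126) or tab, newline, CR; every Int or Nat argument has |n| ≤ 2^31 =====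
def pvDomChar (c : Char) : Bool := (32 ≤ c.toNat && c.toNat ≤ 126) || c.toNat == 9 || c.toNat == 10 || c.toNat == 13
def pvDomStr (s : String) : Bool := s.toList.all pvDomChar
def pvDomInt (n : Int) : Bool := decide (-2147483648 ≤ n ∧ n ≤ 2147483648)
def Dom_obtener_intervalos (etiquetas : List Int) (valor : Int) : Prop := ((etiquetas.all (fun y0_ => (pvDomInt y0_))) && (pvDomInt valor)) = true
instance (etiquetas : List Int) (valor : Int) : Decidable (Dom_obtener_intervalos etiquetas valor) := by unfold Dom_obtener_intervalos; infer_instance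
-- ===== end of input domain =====

-- B replaces A's inicio-sentinel state machine with a groupby-style run-collapsing pass (idiomatic; same cost).

-- ===== PORT A =====
-- loop body: 'if v == valor and inicio is None: … elif v != valor and inicio is not None: …'
def pvStepA (valor : Int) (s : List (Int × Int) × Option Int) (p : Int × Int) : List (Int × Int) × Option Int :=
  match s.2 with
  | none => if p.2 = valor then (s.1, some p.1) else s
  | some inicio => if p.2 ≠ valor then (s.1 ++ [(inicio, p.1 - inicio)], none) else s

-- trailing 'if inicio is not None: intervalos.append((inicio, len(etiquetas) - inicio))'
def pvFinA (r : List (Int × Int) × Option Int) (L : Int) : List (Int × Int) :=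
  match r.2 with
  | some inicio => r.1 ++ [(inicio, L - inicio)]
  | none => r.1

def obtener_intervalos (etiquetas : List Int) (valor : Int) : List (Int × Int) :=
  pvFinA ((PySem.List.enumerate etiquetas 0).foldl (pvStepA valor) ([], none)) (etiquetas.length : Int)

-- ===== PORT B =====
-- itertools.groupby: collapse consecutive equal labels into (key, run length) pairs
def pvRunsGo (x : Int) (n : Nat) : List Int → List (Int × Nat)
  | [] => [(x, n)]
  | y :: ys => if y = x then pvRunsGo x (n + 1) ys else (x, n) :: pvRunsGo y 1 ys

def pvRuns : List Int → List (Int × Nat)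
  | [] => []
  | x :: xs => pvRunsGo x 1 xs

-- loop body: 'if clave == valor: intervalos.append((i, n)); i += n'
def pvStepB (valor : Int) (s : List (Int × Int) × Int) (kn : Int × Nat) : List (Int × Int) × Int :=
  (if kn.1 = valor then s.1 ++ [(s.2, (kn.2 : Int))] else s.1, s.2 + (kn.2 : Int))

def obtener_intervalos_alt (etiquetas : List Int) (valor : Int) : List (Int × Int) :=
  ((pvRuns etiquetas).foldl (pvStepB valor) ([], 0)).1

-- ===== PRECONDITION & SPEC =====
def Spec_obtener_intervalos (etiquetas : List Int) (valor : Int) (out : List (Int × Int)) : Prop := out = obtener_intervalos_alt etiquetas valor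
instance (etiquetas : List Int) (valor : Int) (out : List (Int × Int)) : Decidable (Spec_obtener_intervalos etiquetas valor out) := by unfold Spec_obtener_intervalos; infer_instance

-- ===== CLAIM (what is proved, stated in full; the proofs are below) =====
def Claim_equal_obtener_intervalos : Prop := ∀ (etiquetas : List Int) (valor : Int), Dom_obtener_intervalos etiquetas valor → Spec_obtener_intervalos etiquetas valor (obtener_intervalos etiquetas valor)

-- ===== LEMMAS AND PROOFS =====

-- Bisimulation between A's element-wise state machine and B's fold over runs:
-- mid-run with key x, run length n so far, run start j, A's state is
-- (acc, some j) when x = valor and (acc, none) otherwise, B's state is (acc, j).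
lemma pvMain (valor : Int) : ∀ (ys : List Int) (x : Int) (n : Nat) (j : Int) (acc : List (Int × Int)),
    pvFinA ((PySem.List.enumerate ys (j + n)).foldl (pvStepA valor) (acc, if x = valor then some j else none))
        (j + n + ys.length)
    = ((pvRunsGo x n ys).foldl (pvStepB valor) (acc, j)).1 := by
  intro ys
  induction ys with
  | nil =>
    intro x n j acc
    by_cases hx : x = valor <;>
      simp [PySem.List.enumerate_nil, pvRunsGo, pvStepB, pvFinA, hx]
  | cons y ys ih =>
    intro x n j acc
    rw [PySem.List.enumerate_cons, List.foldl_cons]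
    by_cases hyx : y = x
    · -- run continues: A's state is unchanged, B extends the current run
      have e2 : j + (n : Int) + ((y :: ys).length : Int)
          = j + ((n + 1 : Nat) : Int) + (ys.length : Int) := by simp only [List.length_cons]; push_cast; ring
      have e1 : j + (n : Int) + 1 = j + ((n + 1 : Nat) : Int) := by push_cast; ring
      have hstep : pvStepA valor (acc, if x = valor then some j else none) (j + (n : Int), y)
          = (acc, if x = valor then some j else none) := by
        by_cases hx : x = valor
        · simp [pvStepA, hx, hyx.trans hx]
        · have hy : ¬ y = valor := fun h => hx (hyx ▸ h)
          simp [pvStepA, hx, hy]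
      rw [e2, show pvRunsGo x n (y :: ys) = pvRunsGo x (n + 1) ys from by simp [pvRunsGo, hyx],
        hstep, e1]
      exact ih x (n + 1) j acc
    · -- run boundary: B closes the run (x, n), a new run with key y starts at index j + n
      have e2 : j + (n : Int) + ((y :: ys).length : Int)
          = (j + (n : Int)) + ((1 : Nat) : Int) + (ys.length : Int) := by simp only [List.length_cons]; push_cast; ring
      have e1 : j + (n : Int) + 1 = (j + (n : Int)) + ((1 : Nat) : Int) := by push_cast; ring
      rw [e2, show pvRunsGo x n (y :: ys) = (x, n) :: pvRunsGo y 1 ys from by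
        simp [pvRunsGo, hyx], List.foldl_cons]
      by_cases hx : x = valor
      · -- the closed run carried valor: A appends (j, n) here, B appends it via pvStepB
        have hy : ¬ y = valor := fun h => hyx (h.trans hx.symm)
        rw [show pvStepA valor (acc, if x = valor then some j else none) (j + (n : Int), y)
            = (acc ++ [(j, (n : Int))], none) from by simp [pvStepA, hx, hy]]
        rw [show pvStepB valor (acc, j) (x, (n : Nat)) = (acc ++ [(j, (n : Int))], j + (n : Int))
            from by simp [pvStepB, hx]]
        rw [e1]
        have := ih y 1 (j + (n : Int)) (acc ++ [(j, (n : Int))])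
        rw [if_neg hy] at this
        exact this
      · rw [show pvStepB valor (acc, j) (x, (n : Nat)) = (acc, j + (n : Int)) from by
          simp [pvStepB, hx]]
        by_cases hy : y = valor
        · rw [show pvStepA valor (acc, if x = valor then some j else none) (j + (n : Int), y)
              = (acc, some (j + (n : Int))) from by simp [pvStepA, hx, hy], e1]
          have := ih y 1 (j + (n : Int)) acc
          rw [if_pos hy] at this
          exact this
        · rw [show pvStepA valor (acc, if x = valor then some j else none) (j + (n : Int), y)
              = (acc, none) from by simp [pvStepA, hx, hy], e1]
          have := ih y 1 (j + (n : Int)) acc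
          rw [if_neg hy] at this
          exact this

-- ===== VERDICT (by name: the statement is the Claim_ definition above) =====
theorem obtener_intervalos_spec : Claim_equal_obtener_intervalos := by
  intro etiquetas valor _
  unfold Spec_obtener_intervalos obtener_intervalos obtener_intervalos_alt
  cases etiquetas with
  | nil => simp [PySem.List.enumerate_nil, pvFinA, pvRuns]
  | cons x xs =>
    rw [PySem.List.enumerate_cons, List.foldl_cons]
    rw [show pvStepA valor ([], none) (0, x) = ([], if x = valor then some 0 else none) from by
      by_cases hx : x = valor <;> simp [pvStepA, hx]]
    rw [show (((x :: xs).length : Int)) = (0 : Int) + ((1 : Nat) : Int) + (xs.length : Int) from by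
      simp only [List.length_cons]; push_cast; ring]
    rw [show (0 : Int) + 1 = (0 : Int) + ((1 : Nat) : Int) from by norm_num]
    exact pvMain valor xs x 1 0 []
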